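-- pv_equiv track=rewrite | github.com/AdityaJain1030/K4-free-graph-constructions | scripts/verify_p17_lift.py | _lift_connection_set
-- ===== SOURCE A (Python) =====
-- from math import gcd
--
-- def _lift_connection_set(k: int) -> frozenset[int] | None:
--     """Return the CRT image of {0}×QR_17 in Z_{17k}, i.e. the k-lift of P(17).
--
--     Requires gcd(k, 17) = 1.
--     """
--     if gcd(k, 17) != 1:
--         return None
--     QR_17 = {1, 2, 4, 8, 9, 13, 15, 16}
--     n = 17 * k
--     # CRT: (i mod k, x mod 17)  <->  (17·i·a + k·x·b) mod n, where
--     #   a = 17^{-1} mod k,  b = k^{-1} mod 17.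
--     # For i=0 and x ∈ QR_17, the image is (k·x·b) mod n.
--     if k == 1:
--         return frozenset(QR_17)
--     b = pow(k, -1, 17)
--     return frozenset((k * x * b) % n for x in QR_17)
-- ===== SOURCE B (Python) =====
-- from math import gcd
--
-- def _lift_connection_set(k: int):
--     """k-lift of P(17): scan the 17 multiples j*k of k in Z_{17k} and keep those
--     whose residue mod 17 is a quadratic residue; no modular inverse needed."""
--     if gcd(k, 17) != 1:
--         return None
--     QR_17 = {1, 2, 4, 8, 9, 13, 15, 16}
--     return frozenset(j * k for j in range(17) if (j * k) % 17 in QR_17)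
-- ===== Notes on version B (the rewrite author's own statement) =====
-- stated objective: simpler
-- what changed: Replaced the modular-inverse CRT formula (pow(k,-1,17) and (k*x*b)%n for each quadratic residue x, plus a special k==1 branch) by a single scan of the 17 multiples j*k of k in Z_{17k}, keeping exactly those whose residue mod 17 is a quadratic residue; no inverse and no special case needed.
import Mathlib
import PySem

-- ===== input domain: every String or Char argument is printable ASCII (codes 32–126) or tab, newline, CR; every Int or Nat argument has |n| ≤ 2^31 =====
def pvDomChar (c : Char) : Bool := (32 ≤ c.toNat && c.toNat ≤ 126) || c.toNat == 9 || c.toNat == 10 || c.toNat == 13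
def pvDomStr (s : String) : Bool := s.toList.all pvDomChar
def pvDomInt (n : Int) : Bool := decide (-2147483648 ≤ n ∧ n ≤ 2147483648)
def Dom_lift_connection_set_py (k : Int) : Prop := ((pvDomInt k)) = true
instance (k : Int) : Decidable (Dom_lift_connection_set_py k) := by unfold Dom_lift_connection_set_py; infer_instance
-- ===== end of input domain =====

-- B replaces the modular-inverse CRT formula (pow(k,-1,17) and (k*x*b)%n per residue, plus a
-- special k==1 branch) by one scan of the 17 multiples j*k keeping those whose residue mod 17
-- is a quadratic residue (objective: simpler; both run in constant time, no speed claim).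
-- Python's frozenset has no modelled iteration order (PYSEM.md), so both ports return the
-- set in its canonical ascending order (pvCanonSet); set outputs are compared as sets.

-- ===== PORT A =====
-- the set literal QR_17 = {1, 2, 4, 8, 9, 13, 15, 16}
def pvQR17 : List Int := [1, 2, 4, 8, 9, 13, 15, 16]

-- hand port of pow(k, -1, 17) (PySem.Int.powMod takes only Nat exponents): the unique
-- b in range(17) with (k*b) % 17 == 1; exact whenever gcd(k,17) = 1, the only call site.
def pvInv17 (k : Int) : Int :=
  (((PySem.List.pyRange 0 17 1).find? (fun b => PySem.Int.mod (k * b) 17 == 1)).getD 0)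

-- canonical list representation of a frozenset: distinct elements, ascending
def pvCanonSet (xs : List Int) : List Int :=
  PySem.List.sorted (PySem.Set.ofList xs) (fun x => x) false

def lift_connection_set_py (k : Int) : Option (List Int) :=
  if Int.gcd k 17 ≠ 1 then none
  else
    let n : Int := 17 * k
    if k = 1 then some (pvCanonSet pvQR17)
    else
      let b := pvInv17 k
      some (pvCanonSet (pvQR17.map (fun x => PySem.Int.mod (k * x * b) n)))

-- ===== PORT B =====
def lift_connection_set_py_alt (k : Int) : Option (List Int) :=
  if Int.gcd k 17 ≠ 1 then none
  else
    some (pvCanonSet ((PySem.List.pyRange 0 17 1).filterMap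
      (fun j => if pvQR17.contains (PySem.Int.mod (j * k) 17) then some (j * k) else none)))

-- ===== PRECONDITION & SPEC =====
def Spec_lift_connection_set_py (k : Int) (out : Option (List Int)) : Prop := out = lift_connection_set_py_alt k
instance (k : Int) (out : Option (List Int)) : Decidable (Spec_lift_connection_set_py k out) := by unfold Spec_lift_connection_set_py; infer_instance

-- ===== CLAIM (what is proved, stated in full; the proofs are below) =====
def Claim_equal_lift_connection_set_py : Prop := ∀ (k : Int), Dom_lift_connection_set_py k → Spec_lift_connection_set_py k (lift_connection_set_py k)

-- ===== LEMMAS AND PROOFS =====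

-- uniqueness of Python's floor-mod representative
lemma pvmod_unique {a b q r : Int} (hb : b ≠ 0) (heq : a = q * b + r)
    (hpos : 0 < b → 0 ≤ r ∧ r < b) (hneg : b < 0 → b < r ∧ r ≤ 0) :
    PySem.Int.mod a b = r := by
  have h1 := PySem.Int.floordiv_mul_add_mod a b
  set f := PySem.Int.floordiv a b with hf
  set m := PySem.Int.mod a b with hm
  have hd2 : m - r = b * (q - f) := by linear_combination h1 + heq
  by_cases h0 : m - r = 0
  · linarith
  · exfalso
    have hdvd : b ∣ (m - r) := ⟨q - f, hd2⟩
    have habs1 : |b| ≤ |m - r| :=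
      Int.le_of_dvd (abs_pos.mpr h0) ((abs_dvd _ _).mpr ((dvd_abs _ _).mpr hdvd))
    have habs2 : |m - r| < |b| := by
      rcases lt_or_gt_of_ne hb with hbn | hbp
      · have hr := hneg hbn
        have hmb := PySem.Int.mod_neg_bounds a hbn
        rw [abs_of_neg hbn, abs_lt]
        rw [← hm] at hmb
        omega
      · have hr := hpos hbp
        have hm0 := PySem.Int.mod_nonneg a hbp
        have hm1 := PySem.Int.mod_lt a hbp
        rw [abs_of_pos hbp, abs_lt]
        rw [← hm] at hm0 hm1
        omega
    linarith

-- (k*m) mod 17k equals k times (m mod 17), for k ≠ 0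
lemma pvmod_mul_left (k m : Int) (hk : k ≠ 0) :
    PySem.Int.mod (k * m) (17 * k) = k * PySem.Int.mod m 17 := by
  have h17 : (0:Int) < 17 := by norm_num
  have hq := PySem.Int.floordiv_mul_add_mod m 17
  have ht0 := PySem.Int.mod_nonneg m h17
  have ht1 := PySem.Int.mod_lt m h17
  refine pvmod_unique (b := 17 * k) (q := PySem.Int.floordiv m 17)
    (by simpa using hk) (by linear_combination (-k) * hq) ?_ ?_
  · intro hbpos
    have hkpos : 0 < k := by nlinarith
    exact ⟨mul_nonneg hkpos.le ht0, by nlinarith⟩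
  · intro hbneg
    have hkneg : k < 0 := by nlinarith
    exact ⟨by nlinarith, by nlinarith [mul_nonneg (neg_nonneg.mpr hkneg.le) ht0]⟩

-- mod 17 only depends on the first factor mod 17
lemma pvmod17_mul_congr (a c : Int) :
    PySem.Int.mod (a * c) 17 = PySem.Int.mod (PySem.Int.mod a 17 * c) 17 := by
  have h17 : (0:Int) < 17 := by norm_num
  rw [PySem.Int.mod_eq_emod_of_pos h17, PySem.Int.mod_eq_emod_of_pos h17,
    PySem.Int.mod_eq_emod_of_pos h17]
  conv_lhs => rw [Int.mul_emod]
  conv_rhs => rw [Int.mul_emod, Int.emod_emod_of_dvd a (dvd_refl 17)]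

lemma pvInv17_congr (k : Int) : pvInv17 k = pvInv17 (PySem.Int.mod k 17) := by
  unfold pvInv17
  have hpred : (fun b => PySem.Int.mod (k * b) 17 == 1)
      = (fun b => PySem.Int.mod (PySem.Int.mod k 17 * b) 17 == 1) := by
    funext b
    rw [pvmod17_mul_congr k b]
  rw [hpred]

-- the finite residue check: for every unit residue r mod 17, multiplication by
-- pow(r,-1,17) and by r are inverse maps between QR_17 and the kept j-set
lemma pvresidue_facts : ∀ r ∈ PySem.List.pyRange 1 17 1,
    (∀ x ∈ pvQR17, PySem.Int.mod (PySem.Int.mod (x * pvInv17 r) 17 * r) 17 = x) ∧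
    (∀ j ∈ PySem.List.pyRange 0 17 1, PySem.Int.mod (j * r) 17 ∈ pvQR17 →
       PySem.Int.mod (PySem.Int.mod (j * r) 17 * pvInv17 r) 17 = j) := by decide

lemma pvcanon_eq_of_mem_iff (l1 l2 : List Int) (h : ∀ a, a ∈ l1 ↔ a ∈ l2) :
    pvCanonSet l1 = pvCanonSet l2 := by
  unfold pvCanonSet
  refine PySem.List.sorted_eq_of_perm_of_pairwise_lt _ _ _ ?_ ?_
  · refine (PySem.List.sorted_perm _ _ _).trans ?_
    refine (List.perm_ext_iff_of_nodup (PySem.Set.nodup_ofList _) (PySem.Set.nodup_ofList _)).mpr ?_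
    intro a
    simp only [PySem.Set.mem_ofList, h]
  · exact PySem.List.sorted_ofList_pairwise_lt _

-- A's generator and B's generator enumerate the same set of values
lemma pvmem_iff (k : Int) (hg : Int.gcd k 17 = 1) (a : Int) :
    a ∈ pvQR17.map (fun x => PySem.Int.mod (k * x * pvInv17 k) (17 * k)) ↔
    a ∈ (PySem.List.pyRange 0 17 1).filterMap
      (fun j => if pvQR17.contains (PySem.Int.mod (j * k) 17) then some (j * k) else none) := by
  have hk0 : k ≠ 0 := by rintro rfl; exact absurd hg (by decide)
  have h17k : ¬ (17:Int) ∣ k := by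
    intro hdvd
    obtain ⟨u, v, huv⟩ := Int.isCoprime_iff_gcd_eq_one.mpr hg
    obtain ⟨c, rfl⟩ := hdvd
    have : (17:Int) ∣ 1 := ⟨u * c + v, by linear_combination -huv⟩
    norm_num at this
  have h17 : (0:Int) < 17 := by norm_num
  set r := PySem.Int.mod k 17 with hr
  have hrmem : r ∈ PySem.List.pyRange 1 17 1 := by
    rw [PySem.List.mem_pyRange_one]
    have h0 := PySem.Int.mod_nonneg k h17
    have h1 := PySem.Int.mod_lt k h17
    have hne : r ≠ 0 := fun h => h17k ((PySem.Int.mod_eq_zero_iff_dvd k 17).mp (hr ▸ h))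
    omega
  obtain ⟨hfw, hbw⟩ := pvresidue_facts r hrmem
  have hbinv : pvInv17 k = pvInv17 r := pvInv17_congr k
  have hcong : ∀ c : Int, PySem.Int.mod (c * k) 17 = PySem.Int.mod (c * r) 17 := by
    intro c
    rw [mul_comm c k, mul_comm c r, pvmod17_mul_congr k c, hr]
  constructor
  · intro ha
    obtain ⟨x, hx, hxa⟩ := List.mem_map.mp ha
    rw [mul_assoc, pvmod_mul_left k (x * pvInv17 k) hk0, hbinv] at hxa
    set j := PySem.Int.mod (x * pvInv17 r) 17 with hj
    have hjmem : j ∈ PySem.List.pyRange 0 17 1 := by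
      rw [PySem.List.mem_pyRange_one]
      exact ⟨PySem.Int.mod_nonneg _ h17, PySem.Int.mod_lt _ h17⟩
    refine List.mem_filterMap.mpr ⟨j, hjmem, ?_⟩
    have hjk : PySem.Int.mod (j * k) 17 = x := by rw [hcong j, hfw x hx]
    have hcontains : pvQR17.contains (PySem.Int.mod (j * k) 17) = true := by
      rw [hjk]; exact List.contains_iff_mem.mpr hx
    rw [if_pos hcontains, mul_comm j k, hxa]
  · intro ha
    obtain ⟨j, hjmem, hif⟩ := List.mem_filterMap.mp ha
    by_cases hc : pvQR17.contains (PySem.Int.mod (j * k) 17)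
    · rw [if_pos hc, Option.some_inj] at hif
      set x := PySem.Int.mod (j * k) 17 with hx
      have hxQR : x ∈ pvQR17 := by simpa using hc
      refine List.mem_map.mpr ⟨x, hxQR, ?_⟩
      rw [mul_assoc, pvmod_mul_left k (x * pvInv17 k) hk0, hbinv]
      have hxr : x = PySem.Int.mod (j * r) 17 := by rw [hx, hcong j]
      have hjr : j ∈ PySem.List.pyRange 0 17 1 := hjmem
      have : PySem.Int.mod (x * pvInv17 r) 17 = j := by
        rw [hxr]
        exact hbw j hjr (hxr ▸ hxQR)
      rw [this, ← hif, mul_comm k j]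
    · rw [if_neg hc] at hif
      exact absurd hif (by simp)

-- ===== VERDICT (by name: the statement is the Claim_ definition above) =====
theorem lift_connection_set_py_spec : Claim_equal_lift_connection_set_py := by
  intro k _
  unfold Spec_lift_connection_set_py
  by_cases hg : Int.gcd k 17 = 1
  · by_cases hk1 : k = 1
    · subst hk1; decide
    · unfold lift_connection_set_py lift_connection_set_py_alt
      simp only [hg, ne_eq, not_true_eq_false, if_false, if_neg hk1]
      exact congrArg some (pvcanon_eq_of_mem_iff _ _ (pvmem_iff k hg))
  · unfold lift_connection_set_py lift_connection_set_py_alt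
    simp [hg]
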